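-- pv_equiv track=rewrite | github.com/nbecu/SGE | extract_sge_methods.py | _extract_returns
-- ===== SOURCE A (Python) =====
-- def _extract_returns(docstring: str) -> str:
--     """Extract return information from docstring"""
--     if not docstring:
--         return ""
--
--     # Look for Returns: section
--     lines = docstring.split('\n')
--     in_returns_section = False
--     return_info = []
--
--     for line in lines:
--         line = line.strip()
--         if line.lower().startswith('returns:'):
--             in_returns_section = True
--             return_info.append(line[8:].strip())  # Remove "Returns:"
--         elif in_returns_section:
--             if line and not line.startswith(' '):
--                 break
--             return_info.append(line)
--
--     return ' '.join(return_info).strip()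
-- ===== SOURCE B (Python) =====
-- def _extract_returns(docstring: str) -> str:
--     """Extract return information from docstring"""
--     if not docstring:
--         return ""
--
--     def is_ret(l):
--         return l.lower().startswith('returns:')
--
--     lines = [l.strip() for l in docstring.split('\n')]
--     starts = [i for i, l in enumerate(lines) if is_ret(l)]
--     if not starts:
--         return ""
--     section = lines[starts[0]:]
--     n = next((j for j, l in enumerate(section) if l and not is_ret(l)), len(section))
--     pieces = [l[8:].strip() if is_ret(l) else "" for l in section[:n]]
--     return ' '.join(pieces).strip()
-- ===== Notes on version B (the rewrite author's own statement) =====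
-- stated objective: alternative
-- what changed: Replaces A's single stateful scan (in_returns_section flag, break) with a pipeline: strip all lines once, locate the first Returns: line, take the blank-or-Returns prefix of the tail, and map each kept line to its piece.
import Mathlib
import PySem

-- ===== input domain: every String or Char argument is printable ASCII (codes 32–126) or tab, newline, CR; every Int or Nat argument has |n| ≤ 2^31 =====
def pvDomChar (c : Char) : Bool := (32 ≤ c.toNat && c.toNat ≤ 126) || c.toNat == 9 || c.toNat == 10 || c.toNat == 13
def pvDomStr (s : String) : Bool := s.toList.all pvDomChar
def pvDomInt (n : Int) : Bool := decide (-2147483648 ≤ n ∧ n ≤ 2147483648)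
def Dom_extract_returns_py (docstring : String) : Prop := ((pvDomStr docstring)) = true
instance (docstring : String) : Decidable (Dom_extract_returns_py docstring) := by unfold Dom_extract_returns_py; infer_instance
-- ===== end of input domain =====

-- B replaces A's flag-driven scan with a strip-all / locate-section / slice-and-map pipeline (objective: alternative, same cost).

-- ===== PORT A =====
-- the for-loop with `break`, as structural recursion over the lines with A's exact state (in_returns_section, return_info)
def pvLoopA : List String → Bool → List String → List String
  | [], _, return_info => return_info
  | l :: ls, inSec, return_info =>
    let line := PySem.Str.strip l
    if PySem.Str.startswith (PySem.Str.lower line) "returns:" then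
      pvLoopA ls true (return_info ++ [PySem.Str.strip (PySem.Str.slice line (some 8) none)])
    else if inSec then
      if line != "" && !(PySem.Str.startswith line " ") then return_info   -- break
      else pvLoopA ls inSec (return_info ++ [line])
    else pvLoopA ls inSec return_info

def extract_returns_py (docstring : String) : String :=
  if docstring = "" then ""
  else
    -- docstring.split('\n'): the separator "\n" is never empty, so split? is always `some`
    let lines := (PySem.Str.split? docstring "\n").getD []
    PySem.Str.strip (PySem.Str.join " " (pvLoopA lines false []))

-- ===== PORT B =====
def pvIsRet (l : String) : Bool := PySem.Str.startswith (PySem.Str.lower l) "returns:"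

def pvPiece (l : String) : String :=
  if pvIsRet l then PySem.Str.strip (PySem.Str.slice l (some 8) none) else ""

def extract_returns_py_alt (docstring : String) : String :=
  if docstring = "" then ""
  else
    let lines := ((PySem.Str.split? docstring "\n").getD []).map PySem.Str.strip
    match lines.dropWhile (fun l => !pvIsRet l) with   -- lines[starts[0]:], [] if no Returns: line
    | [] => ""
    | sect => PySem.Str.strip (PySem.Str.join " "
        ((sect.takeWhile (fun l => l == "" || pvIsRet l)).map pvPiece))

-- ===== PRECONDITION & SPEC =====
def Spec_extract_returns_py (docstring : String) (out : String) : Prop := out = extract_returns_py_alt docstring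
instance (docstring : String) (out : String) : Decidable (Spec_extract_returns_py docstring out) := by unfold Spec_extract_returns_py; infer_instance

-- ===== CLAIM (what is proved, stated in full; the proofs are below) =====
def Claim_equal_extract_returns_py : Prop := ∀ (docstring : String), Dom_extract_returns_py docstring → Spec_extract_returns_py docstring (extract_returns_py docstring)

-- ===== LEMMAS AND PROOFS =====

-- heads surviving dropWhile fail the predicate (cons form of List.head_dropWhile_not)
lemma pv_dropWhile_head {α : Type} (p : α → Bool) :
    ∀ (l r : List α) (x : α), List.dropWhile p l = x :: r → p x = false := by
  intro l
  induction l with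
  | nil => intro r x h; simp [List.dropWhile] at h
  | cons a l ih =>
    intro r x h
    by_cases hp : p a
    · rw [List.dropWhile_cons_of_pos hp] at h
      exact ih _ _ h
    · rw [List.dropWhile_cons_of_neg hp] at h
      injection h with h1 _
      rw [← h1]
      simpa using hp

-- a stripped string never starts with a space
lemma pvChars_strip_no_space (cs : List Char) :
    PySem.Chars.startswith (PySem.Chars.strip cs) [' '] = false := by
  by_contra h
  rw [Bool.not_eq_false] at h
  unfold PySem.Chars.startswith at h
  rw [List.isPrefixOf_iff_prefix] at h
  obtain ⟨t, ht⟩ := h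
  have hsuf := List.dropWhile_suffix (l := (PySem.Chars.lstrip cs).reverse) PySem.Chars.isspace
  have hpre : PySem.Chars.strip cs <+: PySem.Chars.lstrip cs := by
    have h2 : (List.dropWhile PySem.Chars.isspace (PySem.Chars.lstrip cs).reverse).reverse
        <+: (PySem.Chars.lstrip cs).reverse.reverse := List.reverse_prefix.mpr hsuf
    simpa [PySem.Chars.strip, PySem.Chars.rstrip] using h2
  obtain ⟨u, hu⟩ := hpre
  rw [← ht] at hu
  have hcons : List.dropWhile PySem.Chars.isspace cs = ' ' :: (t ++ u) := by
    unfold PySem.Chars.lstrip at hu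
    simpa using hu.symm
  have := pv_dropWhile_head PySem.Chars.isspace cs (t ++ u) ' ' hcons
  exact absurd this (by decide)

lemma pvStr_strip_no_space (s : String) :
    PySem.Str.startswith (PySem.Str.strip s) " " = false := by
  have := pvChars_strip_no_space s.toList
  simpa using this

lemma pvIsRet_false (l : String) (h : ¬ pvIsRet l = true) : pvIsRet l = false := by
  revert h; cases pvIsRet l <;> simp

-- in-section phase: with the flag set, A collects exactly the blank-or-Returns prefix, mapped by pvPiece
lemma pvLoopA_true (ls acc : List String) :
    pvLoopA ls true acc =
      acc ++ ((ls.map PySem.Str.strip).takeWhile (fun l => l == "" || pvIsRet l)).map pvPiece := by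
  induction ls generalizing acc with
  | nil => simp only [pvLoopA, List.map_nil, List.takeWhile_nil, List.append_nil]
  | cons l ls ih =>
    simp only [pvLoopA, List.map_cons]
    by_cases h : pvIsRet (PySem.Str.strip l)
    · have h' := h; simp only [pvIsRet] at h'
      rw [if_pos h']
      rw [List.takeWhile_cons_of_pos (by simp only [h, Bool.or_true]), List.map_cons]
      rw [ih]
      rw [show pvPiece (PySem.Str.strip l)
            = PySem.Str.strip (PySem.Str.slice (PySem.Str.strip l) (some 8) none)
          from by simp only [pvPiece, if_pos h]]
      simp only [List.append_assoc, List.singleton_append]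
    · have h' := h; simp only [pvIsRet] at h'
      have hf : pvIsRet (PySem.Str.strip l) = false := pvIsRet_false _ h
      rw [if_neg h', if_true]
      by_cases he : PySem.Str.strip l = ""
      · have hc : ((PySem.Str.strip l != "") && !(PySem.Str.startswith (PySem.Str.strip l) " ")) = false := by
          simp only [he, bne_self_eq_false, Bool.false_and]
        rw [if_neg (by simp only [hc]; decide)]
        rw [List.takeWhile_cons_of_pos (by simp only [he, beq_self_eq_true, Bool.true_or]), List.map_cons]
        rw [ih]
        have hpz : pvPiece (PySem.Str.strip l) = PySem.Str.strip l := by rw [he]; decide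
        simp only [hpz, List.append_assoc, List.singleton_append]
      · have hc : ((PySem.Str.strip l != "") && !(PySem.Str.startswith (PySem.Str.strip l) " ")) = true := by
          simp only [Bool.and_eq_true, bne_iff_ne, ne_eq, Bool.not_eq_true']
          exact ⟨he, pvStr_strip_no_space l⟩
        rw [if_pos hc]
        rw [List.takeWhile_cons_of_neg (by rw [hf, Bool.or_false, beq_eq_false_iff_ne.mpr he]; exact Bool.false_ne_true)]
        simp only [List.map_nil, List.append_nil]

-- search phase: with the flag clear, A skips to the first Returns: line, then runs the in-section phase
lemma pvLoopA_false (ls acc : List String) :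
    pvLoopA ls false acc =
      acc ++ (((ls.map PySem.Str.strip).dropWhile (fun l => !pvIsRet l)).takeWhile
        (fun l => l == "" || pvIsRet l)).map pvPiece := by
  induction ls generalizing acc with
  | nil => simp only [pvLoopA, List.map_nil, List.dropWhile_nil, List.takeWhile_nil, List.append_nil]
  | cons l ls ih =>
    simp only [pvLoopA, List.map_cons]
    by_cases h : pvIsRet (PySem.Str.strip l)
    · have h' := h; simp only [pvIsRet] at h'
      rw [if_pos h']
      rw [pvLoopA_true]
      rw [List.dropWhile_cons_of_neg (by simp only [h, Bool.not_true]; exact Bool.false_ne_true)]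
      rw [List.takeWhile_cons_of_pos (by simp only [h, Bool.or_true]), List.map_cons]
      rw [show pvPiece (PySem.Str.strip l)
            = PySem.Str.strip (PySem.Str.slice (PySem.Str.strip l) (some 8) none)
          from by simp only [pvPiece, if_pos h]]
      simp only [List.append_assoc, List.singleton_append]
    · have h' := h; simp only [pvIsRet] at h'
      have hf : pvIsRet (PySem.Str.strip l) = false := pvIsRet_false _ h
      rw [if_neg h', if_neg (by decide)]
      rw [ih]
      rw [List.dropWhile_cons_of_pos (by simp only [hf, Bool.not_false])]

-- ===== VERDICT (by name: the statement is the Claim_ definition above) =====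
theorem extract_returns_py_spec : Claim_equal_extract_returns_py := by
  intro docstring _
  unfold Spec_extract_returns_py extract_returns_py extract_returns_py_alt
  by_cases hd : docstring = ""
  · rw [if_pos hd, if_pos hd]
  · rw [if_neg hd, if_neg hd]
    show PySem.Str.strip (PySem.Str.join " "
        (pvLoopA ((PySem.Str.split? docstring "\n").getD []) false [])) =
      (match (((PySem.Str.split? docstring "\n").getD []).map PySem.Str.strip).dropWhile
          (fun l => !pvIsRet l) with
       | [] => ""
       | sect => PySem.Str.strip (PySem.Str.join " "
           ((sect.takeWhile (fun l => l == "" || pvIsRet l)).map pvPiece)))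
    rw [pvLoopA_false]
    cases hdw : (((PySem.Str.split? docstring "\n").getD []).map PySem.Str.strip).dropWhile
        (fun l => !pvIsRet l) with
    | nil =>
      simp only [List.takeWhile_nil, List.map_nil, List.nil_append]
      decide
    | cons x xs =>
      simp only [List.nil_append]
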